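-- pv_equiv track=rewrite | github.com/johanndiep/language-models-trajectory-generators | create_finetune_dataset.py | clean_ending
-- ===== SOURCE A (Python) =====
-- def clean_ending(input_string):
--     """
--     Find the end of the useful part of the raw data and remove the terminal artifacts that follow
--     after the last speaker has finished their prompt. Cleaning the data ensures better training
--     examples, thus better model fine-tuning.
--     """
--     lines = input_string.split('\n')
--     speakers = ["user:", "assistant:", "system:"]
--     info_substring = "[INFO/"
--
--     last_speaker_index = -1
--     info_index = -1
--
--     # Iterate through lines to find the last speaker index
--     for i, line in enumerate(lines):
--         if any(line == speaker for speaker in speakers):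
--             last_speaker_index = i
--
--     # Find the first occurrence of info_substring after the last speaker
--     if last_speaker_index != -1:
--         for i in range(last_speaker_index + 1, len(lines)):
--             if info_substring in lines[i]:
--                 info_index = i
--                 break
--
--     # If the info_substring is found after the last speaker, slice the lines accordingly
--     if info_index != -1:
--         cleaned_lines = lines[:info_index]
--         cleaned_string = '\n'.join(cleaned_lines)
--         return cleaned_string, True
--     else:
--         return "Ending is wrong", False
-- ===== SOURCE B (Python) =====
-- def clean_ending(input_string):
--     """Single forward pass: track the last speaker line and the first [INFO/ line
--     strictly after it (reset on each speaker), instead of two separate scans."""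
--     lines = input_string.split('\n')
--     speakers = ["user:", "assistant:", "system:"]
--     last_speaker_index = -1
--     info_index = -1
--     for i, line in enumerate(lines):
--         if line in speakers:
--             last_speaker_index = i
--             info_index = -1
--         elif last_speaker_index != -1 and info_index == -1 and "[INFO/" in line:
--             info_index = i
--     if info_index != -1:
--         return '\n'.join(lines[:info_index]), True
--     return "Ending is wrong", False
-- ===== Notes on version B (the rewrite author's own statement) =====
-- stated objective: simpler
-- what changed: Replaces A's two sequential scans (find last speaker, then re-scan the tail for the first [INFO/ line) by one forward pass over the lines that maintains (last_speaker_index, info_index) with info_index reset whenever a speaker line is seen.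
import Mathlib
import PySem

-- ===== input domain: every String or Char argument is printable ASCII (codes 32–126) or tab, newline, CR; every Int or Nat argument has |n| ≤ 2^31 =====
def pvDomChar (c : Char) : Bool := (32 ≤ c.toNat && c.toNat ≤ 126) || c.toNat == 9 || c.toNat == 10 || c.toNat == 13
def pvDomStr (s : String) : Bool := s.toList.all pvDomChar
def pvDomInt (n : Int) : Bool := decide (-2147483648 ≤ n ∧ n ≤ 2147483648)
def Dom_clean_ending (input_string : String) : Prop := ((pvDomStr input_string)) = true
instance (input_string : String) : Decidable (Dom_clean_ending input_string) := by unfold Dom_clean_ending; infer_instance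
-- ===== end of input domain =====

-- B replaces A's two sequential scans by a single forward pass maintaining
-- (last_speaker_index, info_index) with a reset on each speaker line (objective: simpler).

-- ===== PORT A =====
-- A's second loop ('for i in range(last+1, len(lines)): if "[INFO/" in lines[i]: info_index = i; break'):
-- recursion over the range list, returning the first matching index (break) or -1.
-- lines[i] is ported as pyGetD lines i "": exact here since every i of the range satisfies 0 ≤ i < len(lines).
def pvFindInfoA (lines : List String) : List Int → Int
  | [] => -1
  | i :: rest =>
    if PySem.Str.isIn "[INFO/" (PySem.List.pyGetD lines i "") then i
    else pvFindInfoA lines rest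

def clean_ending (input_string : String) : String × Bool :=
  let lines := (PySem.Str.split? input_string "\n").getD []  -- s.split("\n"): sep nonempty, so split? is always some (exact)
  let speakers := ["user:", "assistant:", "system:"]
  let last_speaker_index : Int :=
    (PySem.List.enumerate lines 0).foldl
      (fun acc p => if speakers.any (fun s => p.2 == s) then p.1 else acc) (-1)
  let info_index : Int :=
    if last_speaker_index ≠ -1 then
      pvFindInfoA lines (PySem.List.pyRange (last_speaker_index + 1) (lines.length : Int) 1)
    else -1
  if info_index ≠ -1 then
    (PySem.Str.join "\n" (PySem.List.slice lines none (some info_index)), true)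
  else ("Ending is wrong", false)

-- ===== PORT B =====
-- B's single loop body: on a speaker line record it and reset info_index;
-- otherwise record the first [INFO/ line seen after a speaker.
def pvStepB (st : Int × Int) (p : Int × String) : Int × Int :=
  if ["user:", "assistant:", "system:"].contains p.2 then (p.1, -1)
  else if st.1 ≠ -1 ∧ st.2 = -1 ∧ PySem.Str.isIn "[INFO/" p.2 then (st.1, p.1)
  else st

def clean_ending_alt (input_string : String) : String × Bool :=
  let lines := (PySem.Str.split? input_string "\n").getD []  -- s.split("\n"): sep nonempty, so split? is always some (exact)
  let st := (PySem.List.enumerate lines 0).foldl pvStepB (-1, -1)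
  if st.2 ≠ -1 then
    (PySem.Str.join "\n" (PySem.List.slice lines none (some st.2)), true)
  else ("Ending is wrong", false)

-- ===== PRECONDITION & SPEC =====
def Spec_clean_ending (input_string : String) (out : String × Bool) : Prop := out = clean_ending_alt input_string
instance (input_string : String) (out : String × Bool) : Decidable (Spec_clean_ending input_string out) := by unfold Spec_clean_ending; infer_instance

-- ===== CLAIM (what is proved, stated in full; the proofs are below) =====
def Claim_equal_clean_ending : Prop := ∀ (input_string : String), Dom_clean_ending input_string → Spec_clean_ending input_string (clean_ending input_string)

-- ===== LEMMAS AND PROOFS =====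

-- A's last-speaker fold, named for the proofs.
def pvLastA (xs : List String) : Int :=
  (PySem.List.enumerate xs 0).foldl
    (fun acc p => if ["user:", "assistant:", "system:"].any (fun s => p.2 == s) then p.1 else acc) (-1)

-- A's info index, named for the proofs.
def pvInfoA (xs : List String) : Int :=
  if pvLastA xs ≠ -1 then
    pvFindInfoA xs (PySem.List.pyRange (pvLastA xs + 1) (xs.length : Int) 1)
  else -1

theorem pvEnumSingle (x : String) (s : Int) : PySem.List.enumerate [x] s = [(s, x)] := rfl

theorem pvLastA_append (xs : List String) (x : String) :
    pvLastA (xs ++ [x]) =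
      if ["user:", "assistant:", "system:"].any (fun s => x == s) then (xs.length : Int)
      else pvLastA xs := by
  unfold pvLastA
  rw [PySem.List.enumerate_append, List.foldl_append, pvEnumSingle]
  simp [List.foldl]

theorem pvLastA_bounds (xs : List String) :
    pvLastA xs = -1 ∨ (0 ≤ pvLastA xs ∧ pvLastA xs < (xs.length : Int)) := by
  induction xs using List.reverseRecOn with
  | nil => left; rfl
  | append_singleton xs x ih =>
    rw [pvLastA_append]
    split
    · right
      constructor
      · positivity
      · simp
    · rcases ih with h | h
      · left; exact h
      · right
        refine ⟨h.1, ?_⟩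
        calc _ < (xs.length : Int) := h.2
          _ ≤ _ := by simp

theorem pvFindInfoA_append (L : List String) (r : List Int) (n : Int)
    (hr : ∀ i ∈ r, 0 ≤ i) :
    pvFindInfoA L (r ++ [n]) =
      if pvFindInfoA L r ≠ -1 then pvFindInfoA L r
      else if PySem.Str.isIn "[INFO/" (PySem.List.pyGetD L n "") then n else -1 := by
  induction r with
  | nil => simp [pvFindInfoA]
  | cons i rest ih =>
    have hi : 0 ≤ i := hr i (by simp)
    simp only [List.cons_append, pvFindInfoA]
    split
    · have : i ≠ -1 := by omega
      simp [this]
    · exact ih (fun j hj => hr j (by simp [hj]))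

theorem pvFindInfoA_congr (L L' : List String) (r : List Int)
    (h : ∀ i ∈ r, PySem.List.pyGetD L i "" = PySem.List.pyGetD L' i "") :
    pvFindInfoA L r = pvFindInfoA L' r := by
  induction r with
  | nil => rfl
  | cons i rest ih =>
    simp only [pvFindInfoA, h i (by simp)]
    rw [ih (fun j hj => h j (by simp [hj]))]

theorem pvKey (xs : List String) :
    (PySem.List.enumerate xs 0).foldl pvStepB (-1, -1) = (pvLastA xs, pvInfoA xs) := by
  induction xs using List.reverseRecOn with
  | nil => rfl
  | append_singleton xs x ih =>
    have hlen : ((xs ++ [x]).length : Int) = (xs.length : Int) + 1 := by simp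
    rw [PySem.List.enumerate_append, List.foldl_append, ih, pvEnumSingle]
    simp only [List.foldl, zero_add]
    by_cases hsp : x = "user:" ∨ x = "assistant:" ∨ x = "system:"
    · -- x is a speaker line: B records (len, -1); A's last becomes len, its scan range is empty
      have hlast : pvLastA (xs ++ [x]) = (xs.length : Int) := by
        rw [pvLastA_append, if_pos (by simpa using hsp)]
      have hinfo : pvInfoA (xs ++ [x]) = -1 := by
        unfold pvInfoA
        rw [hlast, hlen, PySem.List.pyRange_one_eq_nil (by omega)]
        by_cases h : (xs.length : Int) = -1 <;> simp [h, pvFindInfoA]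
      rw [hlast, hinfo]
      simp [pvStepB, hsp]
    · -- x is not a speaker line
      have hlast : pvLastA (xs ++ [x]) = pvLastA xs := by
        rw [pvLastA_append, if_neg (by simpa using hsp)]
      rcases pvLastA_bounds xs with hL | hL
      · -- no speaker yet: everything stays -1
        have hinfoxs : pvInfoA xs = -1 := by simp [pvInfoA, hL]
        have hinfo : pvInfoA (xs ++ [x]) = -1 := by simp [pvInfoA, hlast, hL]
        rw [hlast, hinfo, hL]
        simp [pvStepB, hsp, hinfoxs]
      · -- a speaker exists in xs
        have hL1 : pvLastA xs ≠ -1 := by omega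
        have hget : PySem.List.pyGetD (xs ++ [x]) ((xs.length : Int)) "" = x := by
          rw [PySem.List.pyGetD_eq_getElem _ "" (by positivity) (by simp)]
          simp
        have hrange : PySem.List.pyRange (pvLastA xs + 1) ((xs ++ [x]).length : Int) 1 =
            PySem.List.pyRange (pvLastA xs + 1) (xs.length : Int) 1 ++ [(xs.length : Int)] := by
          rw [hlen, PySem.List.pyRange_one_succ_right (by omega)]
        have hcongr : pvFindInfoA (xs ++ [x]) (PySem.List.pyRange (pvLastA xs + 1) (xs.length : Int) 1)
            = pvFindInfoA xs (PySem.List.pyRange (pvLastA xs + 1) (xs.length : Int) 1) := by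
          apply pvFindInfoA_congr
          intro i hi
          have hmem := (PySem.List.mem_pyRange_one).mp hi
          rw [PySem.List.pyGetD_eq_getElem _ "" (by omega) (by simp; omega),
            PySem.List.pyGetD_eq_getElem _ "" (by omega) (by exact_mod_cast hmem.2)]
          rw [List.getElem_append_left (by omega)]
        have hinfo : pvInfoA (xs ++ [x]) =
            if pvInfoA xs ≠ -1 then pvInfoA xs
            else if PySem.Str.isIn "[INFO/" x then (xs.length : Int) else -1 := by
          unfold pvInfoA
          rw [hlast, if_pos hL1, hrange,
            pvFindInfoA_append _ _ _ (fun i hi => by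
              have := (PySem.List.mem_pyRange_one).mp hi; omega),
            hcongr, hget, if_pos hL1]
        rw [hlast, hinfo]
        by_cases hI : pvInfoA xs = -1
        · simp [pvStepB, hsp, hI, hL1]
          split <;> rfl
        · simp [pvStepB, hsp, hI]

-- ===== VERDICT (by name: the statement is the Claim_ definition above) =====
theorem clean_ending_spec : Claim_equal_clean_ending := by
  intro input_string _
  show clean_ending input_string = clean_ending_alt input_string
  simp only [clean_ending, clean_ending_alt]
  rw [pvKey]
  simp only [pvLastA, pvInfoA]
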